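-- pv_equiv track=rewrite | github.com/ALTA-DE1-ADE-3JULI97/Basic-Programming-Part4 | problem2/main.py | draw_xyz
-- ===== SOURCE A (Python) =====
-- def draw_xyz(N):
--     pattern = ""
--     letters = ['Y', 'Z', 'X']
--     for i in range(N):
--         line = ""
--         for j in range(N):
--             line += letters[(i + j) % 3] + " "
--         pattern += line.strip() + "\n"
--     return pattern
-- ===== SOURCE B (Python) =====
-- def draw_xyz(N):
--     letters = ['Y', 'Z', 'X']
--     rows = [" ".join(letters[(k + j) % 3] for j in range(N)) for k in range(3)]
--     pattern = ""
--     for i in range(N):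
--         pattern += rows[i % 3] + "\n"
--     return pattern
-- ===== Notes on version B (the rewrite author's own statement) =====
-- stated objective: faster
-- what changed: B precomputes the three distinct period-3 rows once (3*N joins) and then assembles the pattern by selecting rows[i % 3], instead of recomputing every cell in an N*N nested loop.
import Mathlib
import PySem

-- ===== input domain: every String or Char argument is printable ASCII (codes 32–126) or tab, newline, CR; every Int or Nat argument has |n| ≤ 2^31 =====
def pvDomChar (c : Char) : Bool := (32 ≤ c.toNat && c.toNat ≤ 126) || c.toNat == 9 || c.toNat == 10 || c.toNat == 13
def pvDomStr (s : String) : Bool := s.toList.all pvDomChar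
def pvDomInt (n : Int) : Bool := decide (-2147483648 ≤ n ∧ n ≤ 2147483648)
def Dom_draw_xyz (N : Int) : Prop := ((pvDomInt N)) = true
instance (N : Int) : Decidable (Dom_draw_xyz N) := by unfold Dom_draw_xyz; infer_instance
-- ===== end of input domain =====

-- B precomputes the three distinct period-3 rows once and assembles the pattern by selecting rows[i % 3] (constant-factor faster; no N×N cell loop).

-- ===== PORT A =====
def draw_xyz (N : Int) : String :=
  let letters : List String := ["Y", "Z", "X"]
  (PySem.List.pyRange 0 N 1).foldl (fun pattern i =>
    let line := (PySem.List.pyRange 0 N 1).foldl (fun line j =>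
      line ++ PySem.List.pyGetD letters (PySem.Int.mod (i + j) 3) "" ++ " ") ""
    pattern ++ PySem.Str.strip line ++ "\n") ""

-- ===== PORT B =====
def draw_xyz_alt (N : Int) : String :=
  let letters : List String := ["Y", "Z", "X"]
  let rows : List String := (PySem.List.pyRange 0 3 1).map (fun k =>
    PySem.Str.join " " ((PySem.List.pyRange 0 N 1).map (fun j =>
      PySem.List.pyGetD letters (PySem.Int.mod (k + j) 3) "")))
  (PySem.List.pyRange 0 N 1).foldl (fun pattern i =>
    pattern ++ PySem.List.pyGetD rows (PySem.Int.mod i 3) "" ++ "\n") ""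

-- ===== PRECONDITION & SPEC =====
def Spec_draw_xyz (N : Int) (out : String) : Prop := out = draw_xyz_alt N
instance (N : Int) (out : String) : Decidable (Spec_draw_xyz N out) := by unfold Spec_draw_xyz; infer_instance

-- ===== CLAIM (what is proved, stated in full; the proofs are below) =====
def Claim_equal_draw_xyz : Prop := ∀ (N : Int), Dom_draw_xyz N → Spec_draw_xyz N (draw_xyz N)

-- ===== LEMMAS AND PROOFS =====

-- a string fold whose step appends a per-element string, seen on code points
theorem pvFoldlStr (l : List Int) (F : String → Int → String) (f : Int → String)
    (hF : ∀ acc i, F acc i = acc ++ f i) (a : String) :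
    (l.foldl F a).toList = a.toList ++ (l.map (fun i => (f i).toList)).flatten := by
  induction l generalizing a with
  | nil => simp
  | cons x xs ih => rw [List.foldl_cons, hF, ih]; simp

-- the letter at cell m, as a single non-space character
def pvCh (m : Int) : Char :=
  if PySem.Int.mod m 3 = 0 then 'Y' else if PySem.Int.mod m 3 = 1 then 'Z' else 'X'

theorem pvG_toList (m : Int) :
    (PySem.List.pyGetD ["Y", "Z", "X"] (PySem.Int.mod m 3) "").toList = [pvCh m] := by
  have h : PySem.Int.mod m 3 = 0 ∨ PySem.Int.mod m 3 = 1 ∨ PySem.Int.mod m 3 = 2 := by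
    simp [PySem.Int.mod, Int.fmod_eq_emod]; omega
  rcases h with h | h | h <;> rw [pvCh, h] <;> decide

theorem pvCh_nonspace (m : Int) : PySem.Chars.isspace (pvCh m) = false := by
  unfold pvCh; split_ifs <;> decide

theorem pvModShift (i j : Int) : PySem.Int.mod (i + j) 3 = PySem.Int.mod (i % 3 + j) 3 := by
  simp [PySem.Int.mod, Int.fmod_eq_emod]

-- the joined row starts with its first letter and ends with a letter
theorem pvJoinHead (c : Char) (cs : List Char) :
    ∃ t, PySem.Chars.join [' '] ((c :: cs).map ([·])) = c :: t := by
  cases cs <;> simp [PySem.Chars.join, List.intercalate]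

theorem pvJoinLast (c : Char) (cs : List Char)
    (h : ∀ d ∈ c :: cs, PySem.Chars.isspace d = false) :
    ∃ t d, PySem.Chars.join [' '] ((c :: cs).map ([·])) = t ++ [d] ∧
      PySem.Chars.isspace d = false := by
  induction cs generalizing c with
  | nil => exact ⟨[], c, by simp [PySem.Chars.join, List.intercalate], h c (by simp)⟩
  | cons c' cs ih =>
    obtain ⟨t, d, ht, hd⟩ := ih c' (fun x hx => h x (by simp at hx ⊢; tauto))
    refine ⟨c :: ' ' :: t, d, ?_, hd⟩
    simp [PySem.Chars.join, List.intercalate] at ht ⊢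
    simp [ht]

-- the raw line (letter + space per cell) is the join plus one trailing space
theorem pvFlatEq (c : Char) (cs : List Char) :
    ((c :: cs).map (fun c => [c, ' '])).flatten =
      PySem.Chars.join [' '] ((c :: cs).map ([·])) ++ [' '] := by
  induction cs generalizing c with
  | nil => simp [PySem.Chars.join, List.intercalate]
  | cons c' cs ih =>
    have := ih c'
    simp [PySem.Chars.join, List.intercalate] at this ⊢
    simp [this]

-- stripping the raw line yields exactly the join
theorem pvStripLine (c : Char) (cs : List Char)
    (h : ∀ d ∈ c :: cs, PySem.Chars.isspace d = false) :
    PySem.Chars.strip (((c :: cs).map (fun c => [c, ' '])).flatten) =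
      PySem.Chars.join [' '] ((c :: cs).map ([·])) := by
  rw [pvFlatEq]
  obtain ⟨t, htl⟩ := pvJoinHead c cs
  obtain ⟨u, d, hul, hd⟩ := pvJoinLast c cs h
  have hct : c :: t = u ++ [d] := htl.symm.trans hul
  have hc : PySem.Chars.isspace c = false := h c (by simp)
  unfold PySem.Chars.strip PySem.Chars.lstrip PySem.Chars.rstrip
  have e1 : (c :: t) ++ [' '] = c :: (t ++ [' ']) := rfl
  rw [htl, e1, List.dropWhile_cons_of_neg (by simp [hc]), ← e1, hct]
  have e2 : ((u ++ [d]) ++ [' ']).reverse = ' ' :: d :: u.reverse := by simp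
  rw [e2, List.dropWhile_cons_of_pos (by decide),
      List.dropWhile_cons_of_neg (by simp [hd])]
  simp

set_option maxHeartbeats 1000000 in
-- splitting port A's outer loop into per-row pieces
theorem pvA_split (N : Int) :
    (draw_xyz N).toList =
      "".toList ++ ((PySem.List.pyRange 0 N 1).map (fun i =>
        (PySem.Str.strip ((PySem.List.pyRange 0 N 1).foldl (fun line j =>
          line ++ PySem.List.pyGetD ["Y", "Z", "X"] (PySem.Int.mod (i + j) 3) "" ++ " ") "")
          ++ "\n").toList)).flatten := by
  unfold draw_xyz
  exact pvFoldlStr (PySem.List.pyRange 0 N 1)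
    (fun pattern i =>
      pattern ++ PySem.Str.strip ((PySem.List.pyRange 0 N 1).foldl (fun line j =>
        line ++ PySem.List.pyGetD ["Y", "Z", "X"] (PySem.Int.mod (i + j) 3) "" ++ " ") "") ++ "\n")
    (fun i =>
      PySem.Str.strip ((PySem.List.pyRange 0 N 1).foldl (fun line j =>
        line ++ PySem.List.pyGetD ["Y", "Z", "X"] (PySem.Int.mod (i + j) 3) "" ++ " ") "") ++ "\n")
    (fun acc i => String.append_assoc) ""

set_option maxHeartbeats 1000000 in
-- splitting port B's assembly loop into per-row pieces
theorem pvB_split (N : Int) :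
    (draw_xyz_alt N).toList =
      "".toList ++ ((PySem.List.pyRange 0 N 1).map (fun i =>
        (PySem.List.pyGetD ((PySem.List.pyRange 0 3 1).map (fun k =>
          PySem.Str.join " " ((PySem.List.pyRange 0 N 1).map (fun j =>
            PySem.List.pyGetD ["Y", "Z", "X"] (PySem.Int.mod (k + j) 3) ""))))
          (PySem.Int.mod i 3) "" ++ "\n").toList)).flatten := by
  unfold draw_xyz_alt
  exact pvFoldlStr (PySem.List.pyRange 0 N 1)
    (fun pattern i =>
      pattern ++ PySem.List.pyGetD ((PySem.List.pyRange 0 3 1).map (fun k =>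
        PySem.Str.join " " ((PySem.List.pyRange 0 N 1).map (fun j =>
          PySem.List.pyGetD ["Y", "Z", "X"] (PySem.Int.mod (k + j) 3) "")))) (PySem.Int.mod i 3) "" ++ "\n")
    (fun i =>
      PySem.List.pyGetD ((PySem.List.pyRange 0 3 1).map (fun k =>
        PySem.Str.join " " ((PySem.List.pyRange 0 N 1).map (fun j =>
          PySem.List.pyGetD ["Y", "Z", "X"] (PySem.Int.mod (k + j) 3) "")))) (PySem.Int.mod i 3) "" ++ "\n")
    (fun acc i => String.append_assoc) ""

theorem pvCh_shift (i j : Int) : pvCh (i % 3 + j) = pvCh (i + j) := by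
  unfold pvCh; rw [pvModShift i j]

-- the per-row equality: A's stripped line i equals B's precomputed row (i mod 3)
theorem pvRow (N i : Int) (hi0 : 0 ≤ i) (hiN : i < N) :
    (PySem.Str.strip ((PySem.List.pyRange 0 N 1).foldl (fun line j =>
        line ++ PySem.List.pyGetD ["Y", "Z", "X"] (PySem.Int.mod (i + j) 3) "" ++ " ") "")).toList =
    (PySem.List.pyGetD ((PySem.List.pyRange 0 3 1).map (fun k =>
        PySem.Str.join " " ((PySem.List.pyRange 0 N 1).map (fun j =>
          PySem.List.pyGetD ["Y", "Z", "X"] (PySem.Int.mod (k + j) 3) ""))))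
      (PySem.Int.mod i 3) "").toList := by
  have hmod : PySem.Int.mod i 3 = i % 3 := by simp [PySem.Int.mod, Int.fmod_eq_emod]
  rw [hmod, PySem.List.pyGetD_map_pyRange_of_nonneg _ 3 (i % 3) _ (by omega) (by omega)]
  rw [PySem.Str.toList_strip, PySem.Str.toList_join,
      pvFoldlStr _ _ (fun j => PySem.List.pyGetD ["Y", "Z", "X"] (PySem.Int.mod (i + j) 3) "" ++ " ")
        (fun acc j => String.append_assoc) ""]
  simp only [List.map_map, Function.comp_def, String.toList_append, pvG_toList, pvCh_shift, List.singleton_append]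
  have hsp : (" " : String).toList = [' '] := rfl
  have hnil : ("" : String).toList = [] := rfl
  rw [hsp, hnil, List.nil_append]
  -- reduce to the pure-character lemma with cs = the row's letters
  have hcs : (PySem.List.pyRange 0 N 1).map (fun j => pvCh (i + j)) ≠ [] := by
    have : i ∈ PySem.List.pyRange 0 N 1 := by
      rw [PySem.List.mem_pyRange_one]; exact ⟨hi0, hiN⟩
    intro hc; rw [List.map_eq_nil_iff] at hc; rw [hc] at this; simp at this
  obtain ⟨c, cs, hccs⟩ := List.exists_cons_of_ne_nil hcs
  have h1 : (PySem.List.pyRange 0 N 1).map (fun j => [pvCh (i + j), ' ']) =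
      ((c :: cs).map (fun c => [c, ' '])) := by
    rw [← hccs, List.map_map]; rfl
  have h2 : (PySem.List.pyRange 0 N 1).map (fun j => [pvCh (i + j)]) =
      ((c :: cs).map ([·])) := by
    rw [← hccs, List.map_map]; rfl
  rw [h1, h2]
  apply pvStripLine
  intro d hd
  rw [← hccs] at hd
  simp only [List.mem_map] at hd
  obtain ⟨j, _, hj⟩ := hd
  rw [← hj]; exact pvCh_nonspace _

set_option maxHeartbeats 1000000 in
-- ===== VERDICT (by name: the statement is the Claim_ definition above) =====
theorem draw_xyz_spec : Claim_equal_draw_xyz := by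
  intro N _
  unfold Spec_draw_xyz
  apply String.toList_inj.mp
  rw [pvA_split, pvB_split]
  rw [show ("".toList : List Char) = [] from rfl]
  simp only [List.nil_append]
  apply congrArg
  apply List.map_congr_left
  intro i hi
  rw [PySem.List.mem_pyRange_one] at hi
  simp only [String.toList_append]
  rw [pvRow N i hi.1 hi.2]
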